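-- pv_equiv track=rewrite | github.com/wgtndan/kegscale-rpi | kegscale_decode.py | mv_to_battery_percentage
-- ===== SOURCE A (Python) =====
-- def mv_to_battery_percentage(millivolts: int) -> int:
--     """
--     Convert millivolt reading to battery percentage.
--     Uses the exact lookup table from the KegMaster app.
--     """
--     battery_voltage_table = [
--         3165, 3246, 3293, 3327, 3353, 3374, 3392, 3408, 3422, 3434,  # 0-9%
--         3445, 3455, 3465, 3473, 3481, 3489, 3496, 3502, 3506, 3514,  # 10-19%
--         3522, 3531, 3539, 3547, 3555, 3563, 3571, 3580, 3588, 3596,  # 20-29%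
--         3604, 3612, 3620, 3629, 3637, 3645, 3653, 3661, 3669, 3678,  # 30-39%
--         3686, 3694, 3702, 3710, 3718, 3727, 3735, 3743, 3751, 3759,  # 40-49%
--         3767, 3776, 3784, 3792, 3800, 3808, 3817, 3825, 3833, 3841,  # 50-59%
--         3849, 3857, 3866, 3874, 3882, 3890, 3898, 3906, 3915, 3923,  # 60-69%
--         3931, 3939, 3947, 3955, 3964, 3972, 3980, 3988, 3996, 4004,  # 70-79%
--         4013, 4021, 4029, 4037, 4045, 4054, 4062, 4070, 4078, 4086,  # 80-89%
--         4094, 4103, 4111, 4119, 4127, 4135, 4143, 4152, 4160, 4168   # 90-100%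
--     ]
--
--     if millivolts < 3165:
--         return 0
--
--     for i, voltage in enumerate(battery_voltage_table):
--         if millivolts < voltage:
--             return i
--
--     return 100
-- ===== SOURCE B (Python) =====
-- # Delta-encoded voltage table (first differences) expanded once at import,
-- # then a hand-written binary search instead of A's front-to-back scan.
-- _DELTAS = [
--     3165, 81, 47, 34, 26, 21, 18, 16, 14, 12,
--     11, 10, 10, 8, 8, 8, 7, 6, 4, 8,
--     8, 9, 8, 8, 8, 8, 8, 9, 8, 8,
--     8, 8, 8, 9, 8, 8, 8, 8, 8, 9,
--     8, 8, 8, 8, 8, 9, 8, 8, 8, 8,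
--     8, 9, 8, 8, 8, 8, 9, 8, 8, 8,
--     8, 8, 9, 8, 8, 8, 8, 8, 9, 8,
--     8, 8, 8, 8, 9, 8, 8, 8, 8, 8,
--     9, 8, 8, 8, 8, 9, 8, 8, 8, 8,
--     8, 9, 8, 8, 8, 8, 8, 9, 8, 8,
-- ]
--
-- _TABLE = []
-- _v = 0
-- for _d in _DELTAS:
--     _v += _d
--     _TABLE.append(_v)
--
--
-- def mv_to_battery_percentage(millivolts: int) -> int:
--     """Binary search over the prefix-sum table, result clamped to 100."""
--     lo, hi = 0, len(_TABLE)
--     while lo < hi: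
--         mid = (lo + hi) // 2
--         if millivolts < _TABLE[mid]:
--             hi = mid
--         else:
--             lo = mid + 1
--     return min(lo, 100)
-- ===== Notes on version B (the rewrite author's own statement) =====
-- stated objective: alternative
-- what changed: Stores the voltage table delta-encoded (first differences, expanded by prefix sums once) and replaces A's front-to-back enumerate scan with a hand-written lo/hi binary search clamped by min(lo, 100), dropping the redundant <3165 guard.
import Mathlib
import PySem

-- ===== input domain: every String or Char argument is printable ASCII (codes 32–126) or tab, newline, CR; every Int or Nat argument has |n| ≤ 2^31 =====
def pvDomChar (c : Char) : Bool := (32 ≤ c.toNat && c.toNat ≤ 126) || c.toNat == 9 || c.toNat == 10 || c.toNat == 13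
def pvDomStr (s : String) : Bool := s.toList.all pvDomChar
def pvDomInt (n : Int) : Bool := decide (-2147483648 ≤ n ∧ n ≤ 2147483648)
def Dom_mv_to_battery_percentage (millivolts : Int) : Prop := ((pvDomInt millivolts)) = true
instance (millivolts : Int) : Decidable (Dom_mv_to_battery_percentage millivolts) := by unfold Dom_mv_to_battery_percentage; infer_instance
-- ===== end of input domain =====

-- B stores the table delta-encoded (prefix sums built once) and binary-searches it,
-- instead of A's literal table with a front-to-back enumerate scan.

-- ===== PORT A =====
-- A's local table literal
def pvBatteryTable : List Int := [
    3165, 3246, 3293, 3327, 3353, 3374, 3392, 3408, 3422, 3434,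
    3445, 3455, 3465, 3473, 3481, 3489, 3496, 3502, 3506, 3514,
    3522, 3531, 3539, 3547, 3555, 3563, 3571, 3580, 3588, 3596,
    3604, 3612, 3620, 3629, 3637, 3645, 3653, 3661, 3669, 3678,
    3686, 3694, 3702, 3710, 3718, 3727, 3735, 3743, 3751, 3759,
    3767, 3776, 3784, 3792, 3800, 3808, 3817, 3825, 3833, 3841,
    3849, 3857, 3866, 3874, 3882, 3890, 3898, 3906, 3915, 3923,
    3931, 3939, 3947, 3955, 3964, 3972, 3980, 3988, 3996, 4004,
    4013, 4021, 4029, 4037, 4045, 4054, 4062, 4070, 4078, 4086,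
    4094, 4103, 4111, 4119, 4127, 4135, 4143, 4152, 4160, 4168]

-- A's 'for i, voltage in enumerate(table): if millivolts < voltage: return i'
def pvScanA (mv : Int) : List (Int × Int) → Option Int
  | [] => none
  | (i, voltage) :: rest => if mv < voltage then some i else pvScanA mv rest

def mv_to_battery_percentage (millivolts : Int) : Int :=
  if millivolts < 3165 then 0
  else
    match pvScanA millivolts (PySem.List.enumerate pvBatteryTable) with
    | some i => i
    | none => 100

-- ===== PORT B =====
-- B's delta-encoded table (first differences of the voltage curve)
def pvDeltas : List Int := [
    3165, 81, 47, 34, 26, 21, 18, 16, 14, 12,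
    11, 10, 10, 8, 8, 8, 7, 6, 4, 8,
    8, 9, 8, 8, 8, 8, 8, 9, 8, 8,
    8, 8, 8, 9, 8, 8, 8, 8, 8, 9,
    8, 8, 8, 8, 8, 9, 8, 8, 8, 8,
    8, 9, 8, 8, 8, 8, 9, 8, 8, 8,
    8, 8, 9, 8, 8, 8, 8, 8, 9, 8,
    8, 8, 8, 8, 9, 8, 8, 8, 8, 8,
    9, 8, 8, 8, 8, 9, 8, 8, 8, 8,
    8, 9, 8, 8, 8, 8, 8, 9, 8, 8]

-- the module-level build loop: running sum appended element by element
def pvBuildTable (v : Int) : List Int → List Int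
  | [] => []
  | d :: rest => (v + d) :: pvBuildTable (v + d) rest

def pvTableB : List Int := pvBuildTable 0 pvDeltas

-- B's hand-written 'while lo < hi' binary search; the fuel argument only makes the
-- recursion structural (hi - lo ≤ fuel always holds at the call)
def pvBisect (a : List Int) (x : Int) : Nat → Nat → Nat → Nat
  | 0, lo, _ => lo
  | fuel + 1, lo, hi =>
    if lo < hi then
      let mid := (lo + hi) / 2
      if x < a.getD mid 0 then pvBisect a x fuel lo mid
      else pvBisect a x fuel (mid + 1) hi
    else lo

def mv_to_battery_percentage_alt (millivolts : Int) : Int :=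
  min ((pvBisect pvTableB millivolts pvTableB.length 0 pvTableB.length : Nat) : Int) 100

-- ===== PRECONDITION & SPEC =====
def Spec_mv_to_battery_percentage (millivolts : Int) (out : Int) : Prop := out = mv_to_battery_percentage_alt millivolts
instance (millivolts : Int) (out : Int) : Decidable (Spec_mv_to_battery_percentage millivolts out) := by unfold Spec_mv_to_battery_percentage; infer_instance

-- ===== CLAIM =====
def Claim_equal_mv_to_battery_percentage : Prop := ∀ (millivolts : Int), Dom_mv_to_battery_percentage millivolts → Spec_mv_to_battery_percentage millivolts (mv_to_battery_percentage millivolts)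

-- ===== LEMMAS AND PROOFS =====

-- binary search returns lo when x is below every probed element
theorem pv_bisect_low (x : Int) (hx : x < 3165) :
    ∀ fuel lo hi, hi ≤ 100 → hi - lo ≤ fuel →
      pvBisect pvTableB x fuel lo hi = lo := by
  have hall : ∀ i, i < 100 → (3165 : Int) ≤ pvTableB.getD i 0 := by decide
  intro fuel
  induction fuel with
  | zero => intro lo hi _ _; rfl
  | succ n ih =>
    intro lo hi h100 hf
    simp only [pvBisect]
    split
    · rename_i hlt
      rw [if_pos (by have := hall ((lo + hi) / 2) (by omega); omega)]
      exact ih lo ((lo + hi) / 2) (by omega) (by omega)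
    · rfl

-- binary search returns hi when x is at or above every probed element
theorem pv_bisect_high (x : Int) (hx : 4168 ≤ x) :
    ∀ fuel lo hi, lo ≤ hi → hi ≤ 100 → hi - lo ≤ fuel →
      pvBisect pvTableB x fuel lo hi = hi := by
  have hall : ∀ i, i < 100 → pvTableB.getD i 0 ≤ (4168 : Int) := by decide
  intro fuel
  induction fuel with
  | zero => intro lo hi hle _ hf; simp only [pvBisect]; omega
  | succ n ih =>
    intro lo hi hle h100 hf
    simp only [pvBisect]
    split
    · rename_i hlt
      rw [if_neg (by have := hall ((lo + hi) / 2) (by omega); omega)]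
      exact ih ((lo + hi) / 2 + 1) hi (by omega) h100 (by omega)
    · omega

-- A's scan returns none when no element exceeds mv
theorem pv_scan_none (mv : Int) : ∀ l : List (Int × Int),
    (∀ p ∈ l, ¬ mv < p.2) → pvScanA mv l = none := by
  intro l
  induction l with
  | nil => intro _; rfl
  | cons p rest ih =>
    intro h
    obtain ⟨i, v⟩ := p
    simp only [pvScanA]
    rw [if_neg (h (i, v) (List.mem_cons_self))]
    exact ih (fun q hq => h q (List.mem_cons_of_mem _ hq))

-- below 3165 both return 0
theorem pv_low (mv : Int) (h : mv < 3165) :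
    mv_to_battery_percentage mv = 0 ∧ mv_to_battery_percentage_alt mv = 0 := by
  refine ⟨by simp [mv_to_battery_percentage, h], ?_⟩
  simp only [mv_to_battery_percentage_alt]
  rw [pv_bisect_low mv h _ 0 pvTableB.length (by decide) (by decide)]
  rfl

-- at or above 4168 both return 100
theorem pv_high (mv : Int) (h : 4168 ≤ mv) :
    mv_to_battery_percentage mv = 100 ∧ mv_to_battery_percentage_alt mv = 100 := by
  constructor
  · have hmem : ∀ p ∈ PySem.List.enumerate pvBatteryTable, p.2 ≤ (4168 : Int) := by decide
    simp only [mv_to_battery_percentage]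
    rw [if_neg (by omega),
      pv_scan_none mv _ (fun p hp => by have := hmem p hp; omega)]
  · simp only [mv_to_battery_percentage_alt]
    rw [pv_bisect_high mv h _ 0 pvTableB.length (by decide) (by decide) (by decide)]
    rfl

-- the finite middle band, one offset at a time
set_option maxHeartbeats 2000000 in
set_option maxRecDepth 4096 in
theorem pv_mid : ∀ k : Nat, k < 1003 →
    mv_to_battery_percentage (3165 + (k : Int)) = mv_to_battery_percentage_alt (3165 + (k : Int)) := by
  decide

-- ===== VERDICT =====
theorem mv_to_battery_percentage_spec : Claim_equal_mv_to_battery_percentage := by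
  intro mv _
  unfold Spec_mv_to_battery_percentage
  rcases lt_or_ge mv 3165 with h | h
  · obtain ⟨a, b⟩ := pv_low mv h; rw [a, b]
  rcases lt_or_ge mv 4168 with h2 | h2
  · have hk : mv = 3165 + ((mv - 3165).toNat : Int) := by omega
    have := pv_mid (mv - 3165).toNat (by omega)
    rw [hk]; exact this
  · obtain ⟨a, b⟩ := pv_high mv h2; rw [a, b]
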